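-- pv_equiv track=rewrite | github.com/Agentic-Environmental-Engineering/GymVerse | gem/gem/envs/RLVE/wil_env.py | _compute_gold_length
-- ===== SOURCE A (Python) =====
-- from typing import Any, Optional, SupportsFloat, Tuple, List, Dict
-- from collections import deque
--
-- def _compute_gold_length(A: List[int], D: int, P: int) -> int:
--     """Compute the optimal (gold) interval length given A, D, and P."""
--     N = len(A)
--     # Build prefix sums S where S[i] = sum of A[0..i-1]
--     S = [0] * (N + 1)
--     for i in range(1, N + 1):
--         S[i] = S[i - 1] + A[i - 1]
--
--     # Deque to maintain candidate segment endpoints (indices in [D..N])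
--     # sorted so that the front q[0] has the segment of length D with the largest sum
--     q: deque[int] = deque([D])
--
--     ans = D  # zero out a segment of length D, giving at least length D
--     l = 1    # current window left endpoint (1-based for S)
--
--     # Slide right endpoint i from D+1 to N (1-based)
--     for i in range(D + 1, N + 1):
--         # Add the new segment [i-D+1..i], with sum = S[i] - S[i-D].
--         # Maintain deque in decreasing order of segment-sums.
--         curr_seg_sum = S[i] - S[i - D]
--         while q and curr_seg_sum > (S[q[-1]] - S[q[-1] - D]):
--             q.pop()
--         q.append(i)
--
--         # Move l forward while the best window [l..i] (minus best segment) exceeds P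
--         # Best segment to zero is the one at q[0]
--         while q and S[i] - S[l - 1] - (S[q[0]] - S[q[0] - D]) > P:
--             l += 1
--             # Drop any segments that no longer fit entirely in [l..i]
--             while q and (q[0] - D + 1) < l:
--                 q.popleft()
--
--         # Update answer: window length is i - l + 1
--         ans = max(ans, i - l + 1)
--
--     return ans
-- ===== SOURCE B (Python) =====
-- def _compute_gold_length(A, D, P):
--     """Compute the optimal (gold) interval length given A, D, and P."""
--     N = len(A)
--     S = [0] * (N + 1)
--     for i in range(1, N + 1):
--         S[i] = S[i - 1] + A[i - 1]
--
--     ans = D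
--     l = 1
--     for i in range(D + 1, N + 1):
--         # Advance l while some D-segment fits in [l..i] and even zeroing the
--         # best such segment leaves the window sum above P.
--         while l + D - 1 <= i:
--             best = max(S[j] - S[j - D] for j in range(l + D - 1, i + 1))
--             if S[i] - S[l - 1] - best > P:
--                 l += 1
--             else:
--                 break
--         ans = max(ans, i - l + 1)
--     return ans
-- ===== Notes on version B (the rewrite author's own statement) =====
-- stated objective: simpler
-- what changed: B drops A's monotonic-deque bookkeeping entirely and, while advancing the left pointer, recomputes the best D-segment of the current window with a direct max over segment endpoints, keeping only the two-pointer loop.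
import Mathlib
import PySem

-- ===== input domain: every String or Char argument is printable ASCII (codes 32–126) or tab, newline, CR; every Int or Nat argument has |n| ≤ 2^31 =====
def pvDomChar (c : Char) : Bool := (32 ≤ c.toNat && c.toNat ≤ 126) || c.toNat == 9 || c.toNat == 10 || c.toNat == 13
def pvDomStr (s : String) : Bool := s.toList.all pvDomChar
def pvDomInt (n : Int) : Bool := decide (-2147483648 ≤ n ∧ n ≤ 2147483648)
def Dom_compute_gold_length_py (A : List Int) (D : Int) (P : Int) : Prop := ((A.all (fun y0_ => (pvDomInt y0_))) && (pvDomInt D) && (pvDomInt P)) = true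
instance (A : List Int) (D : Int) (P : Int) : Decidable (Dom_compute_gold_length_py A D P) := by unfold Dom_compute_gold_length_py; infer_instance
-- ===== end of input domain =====

-- B replaces A's monotonic deque by a plain two-pointer loop that recomputes the
-- best D-segment of the current window directly (simpler, no deque bookkeeping;
-- no speed claim). Equal return values on all inputs with D ≥ 0 (A raises IndexError
-- for D < 0).

-- ===== PORT A =====

-- prefix sums S with S[0] = 0 (the Python loop `S[i] = S[i-1] + A[i-1]`)
def pvPrefix (s : Int) : List Int → List Int
  | [] => []
  | a :: t => (s + a) :: pvPrefix (s + a) t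

-- the D-segment sum ending at j: S[j] - S[j-D]
def pvSeg (S : List Int) (DN : Nat) (j : Nat) : Int := S.getD j 0 - S.getD (j - DN) 0

-- `while q and pred(q[-1]): q.pop()` on a front-first list
def pvPopBack (p : Nat → Bool) : List Nat → List Nat
  | [] => []
  | j :: rest =>
    match pvPopBack p rest with
    | [] => if p j then [] else [j]
    | r => j :: r

-- the inner `while q and S[i]-S[l-1]-(S[q[0]]-S[q[0]-D]) > P:` loop of A.
-- `fuel` is only a totality guard (structural recursion); pvAdvance supplies enough
-- fuel for the loop to run to completion, as proved in pvAdvAux below.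
def pvAdvanceGo (S : List Int) (DN : Nat) (P : Int) (i : Nat) :
    Nat → Nat → List Nat → Nat × List Nat
  | 0, l, q => (l, q)
  | fuel + 1, l, q =>
    match q with
    | [] => (l, [])
    | f :: rest =>
      if S.getD i 0 - S.getD (l - 1) 0 - pvSeg S DN f > P then
        pvAdvanceGo S DN P i fuel (l + 1)
          ((f :: rest).dropWhile (fun j => decide (j + 1 < (l + 1) + DN)))
      else (l, f :: rest)

def pvAdvance (S : List Int) (DN : Nat) (P : Int) (i : Nat) (l : Nat) (q : List Nat) :
    Nat × List Nat :=
  pvAdvanceGo S DN P i (q.length + ((q.map (fun j => (j + 1) - (l + DN))).sum)) l q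

def compute_gold_length_py (A : List Int) (D : Int) (P : Int) : Int :=
  let NN := A.length
  let S := 0 :: pvPrefix 0 A
  let DN := D.toNat
  let st := (List.range' (DN + 1) (NN - DN)).foldl
    (fun (st : List Nat × Nat × Int) i =>
      let q := st.1
      let l := st.2.1
      let ans := st.2.2
      let curr := pvSeg S DN i
      let q1 := pvPopBack (fun j => decide (curr > pvSeg S DN j)) q ++ [i]
      let r := pvAdvance S DN P i l q1
      (r.2, r.1, max ans ((i : Int) - (r.1 : Int) + 1)))
    ([DN], 1, D)
  st.2.2

-- ===== PORT B =====

-- `max(S[j] - S[j-D] for j in range(l+D-1, i+1))`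
def pvBestSeg (S : List Int) (DN : Nat) (lb : Nat) (i : Nat) : Int :=
  match (List.range' lb (i + 1 - lb)).map (pvSeg S DN) with
  | [] => 0
  | x :: xs => xs.foldl max x

-- B's `while l + D - 1 <= i: ... if ... > P: l += 1 else: break`.
-- `fuel` is only a totality guard; pvBLoop supplies enough fuel.
def pvBLoopGo (S : List Int) (DN : Nat) (P : Int) (i : Nat) : Nat → Nat → Nat
  | 0, l => l
  | fuel + 1, l =>
    if l + DN ≤ i + 1 then
      if S.getD i 0 - S.getD (l - 1) 0 - pvBestSeg S DN (l + DN - 1) i > P then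
        pvBLoopGo S DN P i fuel (l + 1)
      else l
    else l

def pvBLoop (S : List Int) (DN : Nat) (P : Int) (i : Nat) (l : Nat) : Nat :=
  pvBLoopGo S DN P i ((i + 2) - (l + DN)) l

def compute_gold_length_py_alt (A : List Int) (D : Int) (P : Int) : Int :=
  let NN := A.length
  let S := 0 :: pvPrefix 0 A
  let DN := D.toNat
  let st := (List.range' (DN + 1) (NN - DN)).foldl
    (fun (st : Nat × Int) i =>
      let l := pvBLoop S DN P i st.1
      (l, max st.2 ((i : Int) - (l : Int) + 1)))
    (1, D)
  st.2

-- ===== PRECONDITION & SPEC =====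
-- Pre_ excludes D < 0, on which Python A raises IndexError (and B raises too).
def Pre_compute_gold_length_py (A : List Int) (D : Int) (P : Int) : Prop := 0 ≤ D
instance (A : List Int) (D : Int) (P : Int) : Decidable (Pre_compute_gold_length_py A D P) := by unfold Pre_compute_gold_length_py; infer_instance
def pvWitness_compute_gold_length_py : List Int × Int × Int := ([3, -1, 4, 1, -5], 2, 3)

def Spec_compute_gold_length_py (A : List Int) (D : Int) (P : Int) (out : Int) : Prop := out = compute_gold_length_py_alt A D P
instance (A : List Int) (D : Int) (P : Int) (out : Int) : Decidable (Spec_compute_gold_length_py A D P out) := by unfold Spec_compute_gold_length_py; infer_instance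

-- ===== CLAIM (what is proved, stated in full; the proofs are below) =====
def Claim_equal_compute_gold_length_py : Prop := ∀ (A : List Int) (D : Int) (P : Int), Dom_compute_gold_length_py A D P → Pre_compute_gold_length_py A D P → Spec_compute_gold_length_py A D P (compute_gold_length_py A D P)

-- ===== LEMMAS AND PROOFS =====

theorem pvMeasureLt (DN l : Nat) (f : Nat) (rest : List Nat) :
    ((f :: rest).dropWhile (fun j => decide (j + 1 < (l + 1) + DN))).length +
      ((((f :: rest).dropWhile (fun j => decide (j + 1 < (l + 1) + DN))).map
        (fun j => (j + 1) - ((l + 1) + DN))).sum) <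
    (f :: rest).length + (((f :: rest).map (fun j => (j + 1) - (l + DN))).sum) := by
  by_cases hf : (f + 1 < (l + 1) + DN)
  · simp only [List.dropWhile_cons, hf, decide_true, if_true]
    have h1 : ((List.dropWhile (fun j => decide (j + 1 < l + 1 + DN)) rest).map
        (fun j => (j + 1) - (l + 1 + DN))).sum ≤ ((rest).map (fun j => (j + 1) - (l + DN))).sum := by
      calc ((List.dropWhile (fun j => decide (j + 1 < l + 1 + DN)) rest).map
            (fun j => (j + 1) - (l + 1 + DN))).sum
          ≤ ((List.dropWhile (fun j => decide (j + 1 < l + 1 + DN)) rest).map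
            (fun j => (j + 1) - (l + DN))).sum := List.sum_le_sum (by intro x _; omega)
        _ ≤ ((rest).map (fun j => (j + 1) - (l + DN))).sum :=
            List.Sublist.sum_le_sum (List.Sublist.map _ (List.dropWhile_sublist _)) (by simp)
    have h2 : (List.dropWhile (fun j => decide (j + 1 < l + 1 + DN)) rest).length ≤ rest.length :=
      (List.dropWhile_sublist _).length_le
    simp only [List.length_cons, List.map_cons, List.sum_cons]
    omega
  · simp only [List.dropWhile_cons, hf, decide_false, Bool.false_eq_true, if_false]
    have h1 : ((rest).map (fun j => (j + 1) - (l + 1 + DN))).sum ≤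
        ((rest).map (fun j => (j + 1) - (l + DN))).sum := List.sum_le_sum (by intro x _; omega)
    simp only [List.length_cons, List.map_cons, List.sum_cons]
    omega


-- The deque invariant: q is sorted, lives in [l+DN-1 .. i], every member dominates
-- everything to its right up to i, and every position in the window is covered by
-- a member at least as good.
def pvInv (S : List Int) (DN i l : Nat) (q : List Nat) : Prop :=
  1 ≤ l ∧ q.Pairwise (· < ·) ∧ (∀ m ∈ q, l + DN ≤ m + 1 ∧ m ≤ i) ∧
  (∀ m ∈ q, ∀ k, m < k → k ≤ i → pvSeg S DN k ≤ pvSeg S DN m) ∧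
  (∀ j, l + DN ≤ j + 1 → j ≤ i → ∃ m ∈ q, j ≤ m ∧ pvSeg S DN j ≤ pvSeg S DN m)

theorem pvPopBack_split (p : Nat → Bool) (q : List Nat) :
    ∃ d, q = pvPopBack p q ++ d ∧ ∀ x ∈ d, p x = true := by
  induction q with
  | nil => exact ⟨[], rfl, by simp⟩
  | cons j rest ih =>
    obtain ⟨d, hd, hpd⟩ := ih
    unfold pvPopBack
    cases hr : pvPopBack p rest with
    | nil =>
      rw [hr] at hd
      simp only [List.nil_append] at hd
      by_cases hj : p j = true
      · refine ⟨j :: rest, by simp [hj], ?_⟩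
        intro x hx
        rcases List.mem_cons.mp hx with h | h
        · exact h ▸ hj
        · exact hpd x (hd ▸ h)
      · exact ⟨rest, by simp [hj, hd], fun x hx => hpd x (hd ▸ hx)⟩
    | cons y ys =>
      rw [hr] at hd
      exact ⟨d, by simpa using hd, hpd⟩

theorem pvPopBack_last_fails (p : Nat → Bool) (q : List Nat) :
    ∀ e, (pvPopBack p q).getLast? = some e → p e = false := by
  induction q with
  | nil => intro e he; simp [pvPopBack] at he
  | cons j rest ih =>
    intro e he
    unfold pvPopBack at he
    cases hr : pvPopBack p rest with
    | nil =>
      rw [hr] at he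
      by_cases hj : p j = true
      · simp [hj] at he
      · simp [hj] at he
        rw [← he]
        simpa using hj
    | cons y ys =>
      rw [hr] at he
      simp only [List.getLast?_cons_cons] at he
      exact ih e (by rw [hr]; exact he)

theorem pvInv_push (S : List Int) (DN i l : Nat) (q : List Nat)
    (h : pvInv S DN i l q) (hb : l + DN ≤ i + 2) :
    pvInv S DN (i + 1) l
      (pvPopBack (fun j => decide (pvSeg S DN (i + 1) > pvSeg S DN j)) q ++ [i + 1]) := by
  obtain ⟨hl, hpw, hbnd, hdom, hcov⟩ := h
  set p : Nat → Bool := fun j => decide (pvSeg S DN (i + 1) > pvSeg S DN j) with hp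
  obtain ⟨d, hq, hd⟩ := pvPopBack_split p q
  have hsub : (pvPopBack p q).Sublist q := List.IsPrefix.sublist ⟨d, hq.symm⟩
  have hmemres : ∀ m ∈ pvPopBack p q, m ∈ q := fun m hm => hsub.mem hm
  have hpwres : (pvPopBack p q).Pairwise (· < ·) := hpw.sublist hsub
  -- every kept element x has pvSeg S DN (i+1) ≤ pvSeg S DN x
  have hkept : ∀ x ∈ pvPopBack p q, pvSeg S DN (i + 1) ≤ pvSeg S DN x := by
    intro x hx
    cases hres : pvPopBack p q with
    | nil => rw [hres] at hx; simp at hx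
    | cons y ys =>
      have hne : pvPopBack p q ≠ [] := by rw [hres]; simp
      have hlast := pvPopBack_last_fails p q ((pvPopBack p q).getLast hne)
        (List.getLast?_eq_getLast_of_ne_nil hne)
      set e := (pvPopBack p q).getLast hne with he
      have hee : pvSeg S DN (i + 1) ≤ pvSeg S DN e := by
        simp [hp] at hlast; omega
      have heq : e ∈ q := hmemres e (List.getLast_mem hne)
      have hxe : x ≤ e := by
        have hdecomp : (pvPopBack p q).dropLast ++ [e] = pvPopBack p q :=
          List.dropLast_append_getLast? e (List.getLast?_eq_getLast_of_ne_nil hne)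
        rw [← hdecomp] at hx hpwres
        rcases List.mem_append.mp hx with h1 | h1
        · have := (List.pairwise_append.mp hpwres).2.2 x h1 e (by simp)
          omega
        · simp at h1; omega
      rcases Nat.lt_or_ge x e with hlt | hge
      · have := hdom x (hmemres x hx) e hlt (hbnd e heq).2
        omega
      · have : x = e := by omega
        rw [this]; exact hee
  refine ⟨hl, ?_, ?_, ?_, ?_⟩
  · refine List.pairwise_append.mpr ⟨hpwres, List.pairwise_singleton _ _, ?_⟩
    intro x hx y hy
    simp at hy
    have := (hbnd x (hmemres x hx)).2
    omega
  · intro m hm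
    rcases List.mem_append.mp hm with h1 | h1
    · have := hbnd m (hmemres m h1); omega
    · simp at h1; omega
  · intro m hm k hk1 hk2
    rcases List.mem_append.mp hm with h1 | h1
    · rcases Nat.lt_or_ge k (i + 1) with hki | hki
      · exact hdom m (hmemres m h1) k hk1 (by omega)
      · have : k = i + 1 := by omega
        rw [this]; exact hkept m h1
    · simp at h1; omega
  · intro j h1 h2
    rcases Nat.lt_or_ge j (i + 1) with hji | hji
    · obtain ⟨m, hmq, hjm, hseg⟩ := hcov j h1 (by omega)
      rw [hq] at hmq
      rcases List.mem_append.mp hmq with hres | hdrop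
      · exact ⟨m, List.mem_append.mpr (Or.inl hres), hjm, hseg⟩
      · have := hd m hdrop
        simp [hp] at this
        exact ⟨i + 1, List.mem_append.mpr (Or.inr (by simp)), by omega, by omega⟩
    · have : j = i + 1 := by omega
      rw [this]
      exact ⟨i + 1, List.mem_append.mpr (Or.inr (by simp)), le_rfl, le_rfl⟩

theorem pvInv_cleanup (S : List Int) (DN i l : Nat) (q : List Nat) (h : pvInv S DN i l q) :
    pvInv S DN i (l + 1) (q.dropWhile (fun j => decide (j + 1 < (l + 1) + DN))) := by
  obtain ⟨hl, hpw, hbnd, hdom, hcov⟩ := h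
  set p : Nat → Bool := fun j => decide (j + 1 < (l + 1) + DN) with hp
  have hsub : (q.dropWhile p).Sublist q := List.dropWhile_sublist p
  have hmem : ∀ m ∈ q.dropWhile p, m ∈ q := fun m hm => hsub.mem hm
  have hfail : ∀ m ∈ q.dropWhile p, ¬ (m + 1 < (l + 1) + DN) := by
    intro m hm
    cases hq : q.dropWhile p with
    | nil => rw [hq] at hm; simp at hm
    | cons h' t' =>
      have hh : p ((q.dropWhile p).head (by rw [hq]; simp)) = false := List.head_dropWhile_not p _
      rw [hq] at hm
      have hh' : ¬ (h' + 1 < (l + 1) + DN) := by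
        have : (q.dropWhile p).head (by rw [hq]; simp) = h' := by simp [hq]
        rw [this] at hh
        simpa [hp] using hh
      rcases List.mem_cons.mp hm with rfl | hmt
      · exact hh'
      · have hlt : h' < m := by
          have hpw' : (h' :: t').Pairwise (· < ·) := by rw [← hq]; exact hpw.sublist hsub
          exact (List.pairwise_cons.mp hpw').1 m hmt
        omega
  refine ⟨by omega, hpw.sublist hsub, ?_, ?_, ?_⟩
  · intro m hm
    have h1 := hbnd m (hmem m hm)
    have h2 := hfail m hm
    omega
  · intro m hm k hk1 hk2
    exact hdom m (hmem m hm) k hk1 hk2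
  · intro j h1 h2
    obtain ⟨m, hmq, hjm, hseg⟩ := hcov j (by omega) h2
    refine ⟨m, ?_, hjm, hseg⟩
    have hsplit : q.takeWhile p ++ q.dropWhile p = q := List.takeWhile_append_dropWhile
    rw [← hsplit] at hmq
    rcases List.mem_append.mp hmq with htk | hdr
    · have := List.mem_takeWhile_imp htk
      simp [hp] at this
      omega
    · exact hdr

theorem pvFoldMax (a x : Int) (xs : List Int) (hm : a ∈ x :: xs) (hle : ∀ b ∈ x :: xs, b ≤ a) :
    xs.foldl max x = a := by
  induction xs generalizing x with
  | nil => rw [List.foldl_nil]; exact (List.mem_singleton.mp hm).symm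
  | cons y t ih =>
    rw [List.foldl_cons]
    refine ih (max x y) ?_ ?_
    · rcases List.mem_cons.mp hm with h | h
      · have hy : y ≤ a := hle y (by simp)
        have : max x y = a := by rw [← h]; exact max_eq_left (h ▸ hy)
        simp [this]
      · rcases List.mem_cons.mp h with h2 | h2
        · have hx : x ≤ a := hle x (by simp)
          have : max x y = a := by rw [← h2]; exact max_eq_right (h2 ▸ hx)
          simp [this]
        · simp [h2]
    · intro b hb
      rcases List.mem_cons.mp hb with h | h
      · subst h
        exact max_le (hle x (by simp)) (hle y (by simp))
      · exact hle b (by simp [h])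

theorem pvHeadMax (S : List Int) (DN i l : Nat) (f : Nat) (rest : List Nat)
    (h : pvInv S DN i l (f :: rest)) :
    pvSeg S DN f = pvBestSeg S DN (l + DN - 1) i := by
  obtain ⟨hl, hpw, hbnd, hdom, hcov⟩ := h
  have hf := hbnd f (by simp)
  have hfmem : f ∈ List.range' (l + DN - 1) (i + 1 - (l + DN - 1)) := by
    rw [List.mem_range'_1]; omega
  have hle : ∀ b ∈ (List.range' (l + DN - 1) (i + 1 - (l + DN - 1))).map (pvSeg S DN),
      b ≤ pvSeg S DN f := by
    intro b hb
    obtain ⟨j, hj, rfl⟩ := List.mem_map.mp hb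
    rw [List.mem_range'_1] at hj
    obtain ⟨m, hmq, hjm, hseg⟩ := hcov j (by omega) (by omega)
    rcases List.mem_cons.mp hmq with rfl | hmr
    · exact hseg
    · have hfm : f < m := (List.pairwise_cons.mp hpw).1 m hmr
      have := hdom f (by simp) m hfm (hbnd m hmq).2
      omega
  unfold pvBestSeg
  cases hL : (List.range' (l + DN - 1) (i + 1 - (l + DN - 1))).map (pvSeg S DN) with
  | nil =>
    exfalso
    have : pvSeg S DN f ∈ (List.range' (l + DN - 1) (i + 1 - (l + DN - 1))).map (pvSeg S DN) :=
      List.mem_map.mpr ⟨f, hfmem, rfl⟩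
    rw [hL] at this; simp at this
  | cons x xs =>
    refine (pvFoldMax (pvSeg S DN f) x xs ?_ ?_).symm
    · rw [← hL]; exact List.mem_map.mpr ⟨f, hfmem, rfl⟩
    · rw [← hL]; exact hle

theorem pvBLoopNeg (S : List Int) (DN : Nat) (P : Int) (i : Nat) (l : Nat)
    (hnc : ¬ (l + DN ≤ i + 1)) : pvBLoop S DN P i l = l := by
  unfold pvBLoop
  cases hk : (i + 2) - (l + DN) with
  | zero => simp [pvBLoopGo]
  | succ k => simp only [pvBLoopGo]; rw [if_neg hnc]

theorem pvAdvAux (S : List Int) (DN : Nat) (P : Int) (i : Nat) :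
    ∀ fuel l (q : List Nat), q.length + ((q.map (fun j => (j + 1) - (l + DN))).sum) ≤ fuel →
    pvInv S DN i l q → l + DN ≤ i + 2 →
    pvBLoop S DN P i l = (pvAdvanceGo S DN P i fuel l q).1 ∧
    pvInv S DN i (pvAdvanceGo S DN P i fuel l q).1 (pvAdvanceGo S DN P i fuel l q).2 ∧
    (pvAdvanceGo S DN P i fuel l q).1 + DN ≤ i + 2 := by
  intro fuel
  induction fuel with
  | zero =>
    intro l q hn h hb
    have hq : q = [] := by
      cases q with
      | nil => rfl
      | cons a t => simp only [List.length_cons] at hn; omega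
    subst hq
    have hnc : ¬ (l + DN ≤ i + 1) := by
      intro hcon
      obtain ⟨m, hm, -⟩ := h.2.2.2.2 i (by omega) le_rfl
      simp at hm
    exact ⟨pvBLoopNeg S DN P i l hnc, h, hb⟩
  | succ fuel ih =>
    intro l q hn h hb
    cases q with
    | nil =>
      have hnc : ¬ (l + DN ≤ i + 1) := by
        intro hcon
        obtain ⟨m, hm, -⟩ := h.2.2.2.2 i (by omega) le_rfl
        simp at hm
      simp only [pvAdvanceGo]
      exact ⟨pvBLoopNeg S DN P i l hnc, h, hb⟩
    | cons f rest =>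
      have hf := h.2.2.1 f (by simp)
      have hcnd1 : l + DN ≤ i + 1 := by omega
      have hbest : pvSeg S DN f = pvBestSeg S DN (l + DN - 1) i := pvHeadMax S DN i l f rest h
      have hkk : (i + 2) - (l + DN) = ((i + 2) - ((l + 1) + DN)) + 1 := by omega
      unfold pvBLoop
      rw [hkk]
      simp only [pvBLoopGo, pvAdvanceGo]
      rw [if_pos hcnd1, ← hbest]
      by_cases hc : S.getD i 0 - S.getD (l - 1) 0 - pvSeg S DN f > P
      · rw [if_pos hc, if_pos hc]
        have hμ := pvMeasureLt DN l f rest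
        exact ih (l + 1) _ (by omega) (pvInv_cleanup S DN i l (f :: rest) h) (by omega)
      · rw [if_neg hc, if_neg hc]
        exact ⟨by trivial, h, by omega⟩

theorem pvAdvEq (S : List Int) (DN : Nat) (P : Int) (i : Nat) (l : Nat) (q : List Nat)
    (h : pvInv S DN i l q) (hb : l + DN ≤ i + 2) :
    pvBLoop S DN P i l = (pvAdvance S DN P i l q).1 ∧
    pvInv S DN i (pvAdvance S DN P i l q).1 (pvAdvance S DN P i l q).2 ∧
    (pvAdvance S DN P i l q).1 + DN ≤ i + 2 :=
  pvAdvAux S DN P i _ l q le_rfl h hb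

theorem pvOuter (S : List Int) (DN : Nat) (P : Int) :
    ∀ (cnt prev l : Nat) (q : List Nat) (ans : Int),
    pvInv S DN prev l q → l + DN ≤ prev + 2 →
    ((List.range' (prev + 1) cnt).foldl
      (fun (st : List Nat × Nat × Int) i =>
        let q := st.1
        let l := st.2.1
        let ans := st.2.2
        let curr := pvSeg S DN i
        let q1 := pvPopBack (fun j => decide (curr > pvSeg S DN j)) q ++ [i]
        let r := pvAdvance S DN P i l q1
        (r.2, r.1, max ans ((i : Int) - (r.1 : Int) + 1)))
      (q, l, ans)).2.2 =
    ((List.range' (prev + 1) cnt).foldl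
      (fun (st : Nat × Int) i =>
        let l := pvBLoop S DN P i st.1
        (l, max st.2 ((i : Int) - (l : Int) + 1)))
      (l, ans)).2 := by
  intro cnt
  induction cnt with
  | zero => intro prev l q ans h hb; rfl
  | succ n ihn =>
    intro prev l q ans h hb
    have hinv1 : pvInv S DN (prev + 1) l
        (pvPopBack (fun j => decide (pvSeg S DN (prev + 1) > pvSeg S DN j)) q ++ [prev + 1]) :=
      pvInv_push S DN prev l q h hb
    obtain ⟨hEq, hInv2, hB2⟩ := pvAdvEq S DN P (prev + 1) l
      (pvPopBack (fun j => decide (pvSeg S DN (prev + 1) > pvSeg S DN j)) q ++ [prev + 1])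
      hinv1 (by omega)
    rw [List.range'_succ]
    show ((List.range' (prev + 1 + 1) n).foldl
      (fun (st : List Nat × Nat × Int) i =>
        let q := st.1
        let l := st.2.1
        let ans := st.2.2
        let curr := pvSeg S DN i
        let q1 := pvPopBack (fun j => decide (curr > pvSeg S DN j)) q ++ [i]
        let r := pvAdvance S DN P i l q1
        (r.2, r.1, max ans ((i : Int) - (r.1 : Int) + 1)))
      ((pvAdvance S DN P (prev + 1) l
          (pvPopBack (fun j => decide (pvSeg S DN (prev + 1) > pvSeg S DN j)) q ++ [prev + 1])).2,
        (pvAdvance S DN P (prev + 1) l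
          (pvPopBack (fun j => decide (pvSeg S DN (prev + 1) > pvSeg S DN j)) q ++ [prev + 1])).1,
        max ans (((prev + 1 : Nat) : Int) - ((pvAdvance S DN P (prev + 1) l
          (pvPopBack (fun j => decide (pvSeg S DN (prev + 1) > pvSeg S DN j)) q ++ [prev + 1])).1 : Int) + 1))).2.2 =
      ((List.range' (prev + 1 + 1) n).foldl
      (fun (st : Nat × Int) i =>
        let l := pvBLoop S DN P i st.1
        (l, max st.2 ((i : Int) - (l : Int) + 1)))
      (pvBLoop S DN P (prev + 1) l,
        max ans (((prev + 1 : Nat) : Int) - ((pvBLoop S DN P (prev + 1) l : Nat) : Int) + 1))).2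
    rw [hEq]
    exact ihn (prev + 1) _ _ _ hInv2 hB2

-- ===== VERDICT (by name: the statement is the Claim_ definition above) =====
theorem compute_gold_length_py_spec : Claim_equal_compute_gold_length_py := by
  intro A D P _ _
  unfold Spec_compute_gold_length_py compute_gold_length_py compute_gold_length_py_alt
  refine pvOuter (0 :: pvPrefix 0 A) D.toNat P (A.length - D.toNat) D.toNat 1 [D.toNat] D ?_ (by omega)
  refine ⟨le_refl 1, List.pairwise_singleton _ _, ?_, ?_, ?_⟩
  · intro m hm; simp at hm; omega
  · intro m hm k hk1 hk2; simp at hm; omega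
  · intro j h1 h2
    have h3 : j = D.toNat := by omega
    subst h3
    exact ⟨D.toNat, List.mem_singleton.mpr rfl, le_rfl, le_rfl⟩
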